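-- pv_equiv track=rewrite | github.com/shristy0611/kurachi-AI | tests/unit/test_glossary_loading.py | assert_glossary_contains
-- ===== SOURCE A (Python) =====
-- def assert_glossary_contains(glossary: dict, must_have: list) -> list:
--     """
--     Check if glossary contains must-have terms in keys OR values (case-insensitive)
--     Returns list of missing terms
--     """
--     keys = {str(k).strip().lower() for k in glossary.keys()}
--     values = {str(v).strip().lower() for v in glossary.values()}
--
--     missing = []
--     for term in must_have:
--         normalized_term = str(term).strip().lower()
--         if normalized_term not in keys and normalized_term not in values:
--             missing.append(term)
--
--     return missing
-- ===== SOURCE B (Python) =====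
-- def assert_glossary_contains(glossary: dict, must_have: list) -> list:
--     """Inverted scan: one pass over the glossary shrinks a pending set of
--     normalized must-have terms; whatever survives is missing."""
--     pending = {str(t).strip().lower() for t in must_have}
--     for k, v in glossary.items():
--         pending.discard(str(k).strip().lower())
--         pending.discard(str(v).strip().lower())
--     return [t for t in must_have if str(t).strip().lower() in pending]
-- ===== Notes on version B (the rewrite author's own statement) =====
-- stated objective: alternative
-- what changed: Inverts the direction of matching: instead of building sets over the glossary's keys/values and testing each term, B builds one pending set of normalized must-have terms, shrinks it in a single pass over the glossary (discarding any normalized key or value), and emits the terms whose normalization survives.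
import Mathlib
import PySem

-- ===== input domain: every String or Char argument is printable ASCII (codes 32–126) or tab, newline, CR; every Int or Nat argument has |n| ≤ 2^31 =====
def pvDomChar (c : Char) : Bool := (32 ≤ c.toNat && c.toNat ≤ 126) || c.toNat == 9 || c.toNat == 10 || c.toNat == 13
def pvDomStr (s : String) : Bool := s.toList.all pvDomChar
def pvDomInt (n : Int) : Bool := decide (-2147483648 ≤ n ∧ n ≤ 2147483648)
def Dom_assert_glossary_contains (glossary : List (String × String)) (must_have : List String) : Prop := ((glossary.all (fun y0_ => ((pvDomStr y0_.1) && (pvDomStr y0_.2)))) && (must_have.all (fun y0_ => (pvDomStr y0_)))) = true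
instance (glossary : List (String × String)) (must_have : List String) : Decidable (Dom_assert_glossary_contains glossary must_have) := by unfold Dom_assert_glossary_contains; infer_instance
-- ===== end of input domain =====

-- B inverts the matching direction: one pass over the glossary shrinks a pending set of normalized must-have terms, then the surviving terms are emitted (alternative decomposition, same cost class).

-- ===== PORT A =====
def pvNorm (s : String) : String := PySem.Str.lower (PySem.Str.strip s)

def assert_glossary_contains (glossary : List (String × String)) (must_have : List String) : List String :=
  let keys : PySem.Set String := PySem.Set.ofList (glossary.map (fun p => pvNorm p.1))
  let values : PySem.Set String := PySem.Set.ofList (glossary.map (fun p => pvNorm p.2))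
  must_have.foldl (fun missing term =>
    let normalized := pvNorm term
    if ¬ (PySem.Set.contains keys normalized = true) ∧ ¬ (PySem.Set.contains values normalized = true) then
      missing ++ [term]
    else missing) []

-- ===== PORT B =====
def assert_glossary_contains_alt (glossary : List (String × String)) (must_have : List String) : List String :=
  let pending : PySem.Set String :=
    glossary.foldl (fun s p => PySem.Set.discard (PySem.Set.discard s (pvNorm p.1)) (pvNorm p.2))
      (PySem.Set.ofList (must_have.map pvNorm))
  must_have.filter (fun t => PySem.Set.contains pending (pvNorm t))

-- ===== PRECONDITION & SPEC =====
def Spec_assert_glossary_contains (glossary : List (String × String)) (must_have : List String) (out : List String) : Prop := out = assert_glossary_contains_alt glossary must_have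
instance (glossary : List (String × String)) (must_have : List String) (out : List String) : Decidable (Spec_assert_glossary_contains glossary must_have out) := by unfold Spec_assert_glossary_contains; infer_instance

-- ===== CLAIM (what is proved, stated in full; the proofs are below) =====
def Claim_equal_assert_glossary_contains : Prop := ∀ (glossary : List (String × String)) (must_have : List String), Dom_assert_glossary_contains glossary must_have → Spec_assert_glossary_contains glossary must_have (assert_glossary_contains glossary must_have)

-- ===== LEMMAS AND PROOFS =====
theorem mem_foldl_discard (gl : List (String × String)) (s : PySem.Set String) (x : String) :
    x ∈ gl.foldl (fun s p => PySem.Set.discard (PySem.Set.discard s (pvNorm p.1)) (pvNorm p.2)) s ↔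
      x ∈ s ∧ ∀ p ∈ gl, x ≠ pvNorm p.1 ∧ x ≠ pvNorm p.2 := by
  induction gl generalizing s with
  | nil => simp
  | cons q gl ih =>
    simp only [List.foldl_cons, ih, PySem.Set.mem_discard, List.mem_cons]
    constructor
    · rintro ⟨⟨⟨hs, h1⟩, h2⟩, hall⟩
      refine ⟨hs, ?_⟩
      rintro p (rfl | hp)
      · exact ⟨h1, h2⟩
      · exact hall p hp
    · rintro ⟨hs, hall⟩
      obtain ⟨h1, h2⟩ := hall q (Or.inl rfl)
      exact ⟨⟨⟨hs, h1⟩, h2⟩, fun p hp => hall p (Or.inr hp)⟩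

theorem contains_ofList_map {α β : Type} [BEq α] [LawfulBEq α] (l : List β) (f : β → α) (x : α) :
    PySem.Set.contains (PySem.Set.ofList (l.map f)) x = l.any (fun p => x == f p) := by
  rw [Bool.eq_iff_iff]
  simp only [PySem.Set.contains, List.elem_iff, PySem.Set.mem_ofList, List.mem_map,
    List.any_eq_true, beq_iff_eq]
  constructor
  · rintro ⟨p, hp, rfl⟩; exact ⟨p, hp, rfl⟩
  · rintro ⟨p, hp, rfl⟩; exact ⟨p, hp, rfl⟩

-- ===== VERDICT (by name: the statement is the Claim_ definition above) =====
theorem assert_glossary_contains_spec : Claim_equal_assert_glossary_contains := by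
  intro glossary must_have _
  show _ = _
  unfold assert_glossary_contains assert_glossary_contains_alt
  rw [PySem.List.foldl_append_ite_eq_filter]
  simp only [List.nil_append]
  apply List.filter_congr
  intro t ht
  simp only [contains_ofList_map]
  rw [Bool.eq_iff_iff, decide_eq_true_iff, PySem.Set.contains_iff, mem_foldl_discard]
  simp only [PySem.Set.mem_ofList, List.mem_map, List.any_eq_true, beq_iff_eq]
  constructor
  · rintro ⟨h1, h2⟩
    refine ⟨⟨t, ht, rfl⟩, fun p hp => ⟨fun e => h1 ⟨p, hp, e⟩, fun e => h2 ⟨p, hp, e⟩⟩⟩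
  · rintro ⟨-, hall⟩
    exact ⟨fun ⟨p, hp, e⟩ => (hall p hp).1 e, fun ⟨p, hp, e⟩ => (hall p hp).2 e⟩
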